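-- pv_equiv track=rewrite | github.com/craigargh/guitar-practice-core | guitarpractice/formatters.py | split_staves
-- ===== SOURCE A (Python) =====
-- from typing import List
--
-- def split_staves(elements: List[str]) -> List[List[str]]:
--     groups = [[]]
--     bar_count = 0
--     groups_count = 0
--
--     for element in elements:
--         if element == '|':
--             bar_count += 1
--
--         groups[groups_count].append(element)
--
--         if bar_count == 2:
--             groups.append([])
--             groups_count += 1
--             bar_count = 0
--
--     return groups
-- ===== SOURCE B (Python) =====
-- from typing import List, Optional, Tuple
--
--
-- def _cut_after_second_bar(elements: List[str]) -> Optional[Tuple[List[str], List[str]]]: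
--     count = 0
--     for i, element in enumerate(elements):
--         if element == '|':
--             count += 1
--             if count == 2:
--                 return elements[:i + 1], elements[i + 1:]
--     return None
--
--
-- def split_staves(elements: List[str]) -> List[List[str]]:
--     cut = _cut_after_second_bar(elements)
--     if cut is None:
--         return [elements]
--     head, rest = cut
--     return [head] + split_staves(rest)
-- ===== Notes on version B (the rewrite author's own statement) =====
-- stated objective: alternative
-- what changed: Replaces A's single-pass accumulator (mutable groups list with bar/group counters) by structural recursion: find the cut point after the second '|', slice a chunk off, and recurse on the remainder.
import Mathlib
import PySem

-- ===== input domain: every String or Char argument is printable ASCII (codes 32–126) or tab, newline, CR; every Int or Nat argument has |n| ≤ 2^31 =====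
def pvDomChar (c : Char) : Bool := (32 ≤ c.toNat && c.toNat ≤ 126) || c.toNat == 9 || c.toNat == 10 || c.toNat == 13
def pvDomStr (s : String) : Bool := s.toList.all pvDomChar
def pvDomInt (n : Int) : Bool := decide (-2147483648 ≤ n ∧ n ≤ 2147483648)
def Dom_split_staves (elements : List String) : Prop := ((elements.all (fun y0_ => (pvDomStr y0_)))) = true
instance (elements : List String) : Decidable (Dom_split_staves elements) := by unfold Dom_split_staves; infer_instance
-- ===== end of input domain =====

-- B recurses by cutting after each second '|' (slice + recursion) instead of A's one-pass mutable accumulator; same cost, same results.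

-- ===== PORT A =====
-- In A, groups[groups_count] is always the LAST group of `groups`; the state is
-- modeled as (done = groups without its last entry, cur = the last entry, bar_count).
def splitA_loop : List String → List (List String) → List String → Int → List (List String)
  | [], done, cur, _ => done ++ [cur]
  | e :: es, done, cur, bar =>
    let bar' := if e = "|" then bar + 1 else bar
    let cur' := cur ++ [e]
    if bar' = 2 then splitA_loop es (done ++ [cur']) [] 0
    else splitA_loop es done cur' bar'

def split_staves (elements : List String) : List (List String) :=
  splitA_loop elements [] [] 0

-- ===== PORT B =====
-- returns (elements[:i+1], elements[i+1:]) at the second '|', or none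
def cutAfterSecondBar : Int → List String → Option (List String × List String)
  | _, [] => none
  | count, e :: es =>
    if e = "|" then
      if count + 1 = 2 then some ([e], es)
      else
        match cutAfterSecondBar (count + 1) es with
        | none => none
        | some (p, r) => some (e :: p, r)
    else
      match cutAfterSecondBar count es with
      | none => none
      | some (p, r) => some (e :: p, r)

theorem cutAfterSecondBar_length {count : Int} {es : List String} {p r : List String}
    (h : cutAfterSecondBar count es = some (p, r)) : r.length < es.length := by
  induction es generalizing count p r with
  | nil => simp [cutAfterSecondBar] at h
  | cons e es ih =>
    simp only [cutAfterSecondBar] at h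
    split at h
    · split at h
      · simp_all
      · cases hc : cutAfterSecondBar (count + 1) es with
        | none => simp [hc] at h
        | some pr =>
          obtain ⟨p', r'⟩ := pr
          simp [hc] at h
          obtain ⟨_, hr⟩ := h
          have := ih hc
          simp [← hr]; omega
    · cases hc : cutAfterSecondBar count es with
      | none => simp [hc] at h
      | some pr =>
        obtain ⟨p', r'⟩ := pr
        simp [hc] at h
        obtain ⟨_, hr⟩ := h
        have := ih hc
        simp [← hr]; omega

def split_staves_alt (elements : List String) : List (List String) :=
  match h : cutAfterSecondBar 0 elements with
  | none => [elements]
  | some (head, rest) => head :: split_staves_alt rest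
termination_by elements.length
decreasing_by exact cutAfterSecondBar_length h

-- ===== PRECONDITION & SPEC =====
def Spec_split_staves (elements : List String) (out : List (List String)) : Prop := out = split_staves_alt elements
instance (elements : List String) (out : List (List String)) : Decidable (Spec_split_staves elements out) := by unfold Spec_split_staves; infer_instance

-- ===== CLAIM (what is proved, stated in full; the proofs are below) =====
def Claim_equal_split_staves : Prop := ∀ (elements : List String), Dom_split_staves elements → Spec_split_staves elements (split_staves elements)

-- ===== LEMMAS AND PROOFS =====

-- B's result with the bar counter started at `bar` instead of 0
def splitB_aux (bar : Int) (es : List String) : List (List String) :=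
  match cutAfterSecondBar bar es with
  | none => [es]
  | some (head, rest) => head :: split_staves_alt rest

def mapHead (f : List String → List String) : List (List String) → List (List String)
  | [] => []
  | g :: gs => f g :: gs

theorem splitB_aux_zero (es : List String) : splitB_aux 0 es = split_staves_alt es := by
  unfold splitB_aux
  rw [split_staves_alt.eq_def]
  cases hc : cutAfterSecondBar 0 es with
  | none => simp
  | some pr => obtain ⟨p, r⟩ := pr; simp

theorem mapHead_id (l : List (List String)) : mapHead (fun g => g) l = l := by
  cases l <;> simp [mapHead]

theorem splitB_aux_cons (bar : Int) (e : String) (es : List String) :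
    splitB_aux bar (e :: es) =
      if e = "|" then
        if bar + 1 = 2 then [e] :: split_staves_alt es
        else mapHead (fun g => e :: g) (splitB_aux (bar + 1) es)
      else mapHead (fun g => e :: g) (splitB_aux bar es) := by
  simp only [splitB_aux, cutAfterSecondBar]
  split_ifs with h1 h2
  · rfl
  · cases hc : cutAfterSecondBar (bar + 1) es with
    | none => simp [mapHead]
    | some pr => obtain ⟨p, r⟩ := pr; simp [mapHead]
  · cases hc : cutAfterSecondBar bar es with
    | none => simp [mapHead]
    | some pr => obtain ⟨p, r⟩ := pr; simp [mapHead]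

theorem splitA_loop_eq (es : List String) :
    ∀ (done : List (List String)) (cur : List String) (bar : Int), bar ≠ 2 →
      splitA_loop es done cur bar = done ++ mapHead (fun g => cur ++ g) (splitB_aux bar es) := by
  induction es with
  | nil => intro done cur bar _; simp [splitA_loop, splitB_aux, cutAfterSecondBar, mapHead]
  | cons e es ih =>
    intro done cur bar hbar
    rw [splitA_loop, splitB_aux_cons]
    by_cases h1 : e = "|"
    · simp only [h1, ite_true]
      by_cases h2 : bar + 1 = 2
      · rw [if_pos h2, if_pos h2, ih _ _ 0 (by decide), splitB_aux_zero]
        cases split_staves_alt es <;> simp [mapHead]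
      · rw [if_neg h2, if_neg h2, ih _ _ (bar + 1) h2]
        cases splitB_aux (bar + 1) es <;> simp [mapHead]
    · simp only [if_neg h1, if_neg hbar, ih _ _ bar hbar]
      cases splitB_aux bar es <;> simp [mapHead]

-- ===== VERDICT (by name: the statement is the Claim_ definition above) =====
theorem split_staves_spec : Claim_equal_split_staves := by
  intro elements _
  unfold Spec_split_staves split_staves
  rw [splitA_loop_eq elements [] [] 0 (by decide), splitB_aux_zero]
  simp [mapHead_id]
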